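-- pv_equiv track=rewrite | github.com/Yaksh-Projectkmt/OEA_AI_DEV | test.py | PACcounter
-- ===== SOURCE A (Python) =====
-- def PACcounter(PAC_R_Peaks, hr_counts):
--     svt_counter = 0
--     couplet_counter = 0
--     triplet_counter = 0
--     bigeminy_counter = 0
--     trigeminy_counter = 0
--     quadrigeminy_counter = 0
--     at = 0
--     i = 0
--     while i < len(PAC_R_Peaks):
--         count = 0
--         ones_count = 0
--         while i < len(PAC_R_Peaks) and PAC_R_Peaks[i] == 1:
--             count += 1
--             ones_count += 1
--             i += 1
--
--         if count >= 4:
--             svt_counter += 1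
--             at += ones_count
--             count = 0
--             ones_count = 0
--         if count == 3:
--             triplet_counter += 1
--         elif count == 2:
--             couplet_counter += 1
--         i += 1
--     j = 0
--     while j < len(PAC_R_Peaks) - 1:
--         if PAC_R_Peaks[j] == 1:
--             k = j + 1
--             spaces = 0
--             while k < len(PAC_R_Peaks) and PAC_R_Peaks[k] == 0:
--                 spaces += 1
--                 k += 1
--
--             if k < len(PAC_R_Peaks) and PAC_R_Peaks[k] == 1:
--                 if spaces == 1:
--                     bigeminy_counter += 1
--                 elif spaces == 2:
--                     trigeminy_counter += 1
--                 elif spaces == 3: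
--                     quadrigeminy_counter += 1
--             j = k
--         else:
--             j += 1
--
--     total_one = (1*at) + (couplet_counter*2)+ (triplet_counter*3)+ (bigeminy_counter*2)+ (trigeminy_counter*2)+ (quadrigeminy_counter*2)
--     total = svt_counter + couplet_counter+ triplet_counter+ bigeminy_counter+ trigeminy_counter+ quadrigeminy_counter
--     ones = PAC_R_Peaks.count(1)
--     if total == 0:
--         Isolated = ones
--     else:
--         Common = total-1
--         Isolated = ones - (total_one - Common)
--     if hr_counts > 100:
--         if svt_counter != 0:
--             triplet_counter = couplet_counter = quadrigeminy_counter = trigeminy_counter = bigeminy_counter = Isolated = 0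
--     if svt_counter>=1 and hr_counts > 100: # 190
--         svt_counter=1
--     else:
--         svt_counter=0
--
--     data = {"PAC-Isolated_counter":Isolated,
--             "PAC-Bigem_counter":bigeminy_counter,
--             "PAC-Trigem_counter":trigeminy_counter,
--             "PAC-Quadrigem_counter":quadrigeminy_counter,
--             "PAC-Couplet_counter":couplet_counter,
--             "PAC-Triplet_counter":triplet_counter,
--             "SVT_counter":svt_counter} # svt_counter
--     return data
-- ===== SOURCE B (Python) =====
-- def PACcounter(PAC_R_Peaks, hr_counts):
--     # Single pass: a run-length state machine over the signal (no second scan, no list.count).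
--     def finish(st, v, c):
--         svt, coup, trip, big, trig, quad, at, ones, last_one, gap = st
--         if v == 1:
--             ones += c
--             if c >= 4:
--                 svt += 1
--                 at += c
--             elif c == 3:
--                 trip += 1
--             elif c == 2:
--                 coup += 1
--             if gap == 1:
--                 big += 1
--             elif gap == 2:
--                 trig += 1
--             elif gap == 3:
--                 quad += 1
--             return (svt, coup, trip, big, trig, quad, at, ones, True, 0)
--         if v == 0:
--             return (svt, coup, trip, big, trig, quad, at, ones, False, c if last_one else 0)
--         return (svt, coup, trip, big, trig, quad, at, ones, False, 0)
--
--     st = (0, 0, 0, 0, 0, 0, 0, 0, False, 0)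
--     cur_val, cur_len = 0, 0
--     for x in PAC_R_Peaks:
--         if cur_len != 0 and x == cur_val:
--             cur_len += 1
--         else:
--             if cur_len != 0:
--                 st = finish(st, cur_val, cur_len)
--             cur_val, cur_len = x, 1
--     if cur_len != 0:
--         st = finish(st, cur_val, cur_len)
--     svt, coup, trip, big, trig, quad, at, ones = st[:8]
--
--     total = svt + coup + trip + big + trig + quad
--     extra = at + 2 * (coup + big + trig + quad) + 3 * trip
--     isolated = ones if total == 0 else ones - extra + total - 1
--     high_svt = svt != 0 and hr_counts > 100
--     if high_svt:
--         coup = trip = big = trig = quad = isolated = 0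
--     return {"PAC-Isolated_counter": isolated,
--             "PAC-Bigem_counter": big,
--             "PAC-Trigem_counter": trig,
--             "PAC-Quadrigem_counter": quad,
--             "PAC-Couplet_counter": coup,
--             "PAC-Triplet_counter": trip,
--             "SVT_counter": 1 if high_svt else 0}
-- ===== Notes on version B (the rewrite author's own statement) =====
-- stated objective: faster
-- what changed: A's two separate index-walking while-loop scans (a nested ones-run scan plus a second scan restarting a zero-gap scan from each 1) are replaced by one single left-to-right pass: a run-length state machine that folds over the signal once, classifying each finished run of 1s by length and each pending zero-gap when the next 1-run closes it, and counting the 1s in the same pass instead of a separate list.count. One traversal instead of three gives a measured constant-factor speedup.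
import Mathlib
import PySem

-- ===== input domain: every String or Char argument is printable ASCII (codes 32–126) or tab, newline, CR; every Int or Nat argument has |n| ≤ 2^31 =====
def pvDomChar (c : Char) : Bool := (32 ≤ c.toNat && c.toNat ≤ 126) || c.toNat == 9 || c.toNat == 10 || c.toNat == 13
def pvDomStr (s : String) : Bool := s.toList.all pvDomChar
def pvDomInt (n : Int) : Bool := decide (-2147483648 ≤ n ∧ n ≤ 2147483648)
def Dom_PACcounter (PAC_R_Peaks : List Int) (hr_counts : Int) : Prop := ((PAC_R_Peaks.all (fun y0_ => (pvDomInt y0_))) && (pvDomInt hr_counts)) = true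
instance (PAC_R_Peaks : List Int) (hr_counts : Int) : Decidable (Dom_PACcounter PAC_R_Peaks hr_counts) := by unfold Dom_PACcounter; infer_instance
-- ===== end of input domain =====

-- B replaces A's two index-walking scans (plus list.count) by ONE single pass: a run-length
-- state machine folded over the signal; same return value, measured constant-factor faster.

-- ===== PORT A =====
-- inner while of A's first loop: returns (count, ones_count, remaining suffix)
def pvRunOnes : List Int → Nat × Nat × List Int
  | [] => (0, 0, [])
  | x :: xs =>
    if x = 1 then
      let p := pvRunOnes xs
      (p.1 + 1, p.2.1 + 1, p.2.2)
    else (0, 0, x :: xs)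

theorem pvRunOnes_len (l : List Int) : (pvRunOnes l).2.2.length ≤ l.length := by
  induction l with
  | nil => simp [pvRunOnes]
  | cons x xs ih => by_cases h : x = 1 <;> simp [pvRunOnes, h] <;> omega

-- A's first while loop (i-indexed in Python; here recursion on the suffix at i)
def pvLoopA1 : List Int → Int → Int → Int → Int → Int × Int × Int × Int
  | [], svt, coup, trip, at_ => (svt, coup, trip, at_)
  | x :: xs, svt, coup, trip, at_ =>
    let r := pvRunOnes (x :: xs)
    -- if count >= 4: svt += 1; at += ones_count; count = 0; ones_count = 0
    let s1 : Int × Int × Nat := if r.1 ≥ 4 then (svt + 1, at_ + (r.2.1 : Int), 0) else (svt, at_, r.1)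
    -- if count == 3: triplet += 1 elif count == 2: couplet += 1
    let s2 : Int × Int := if s1.2.2 = 3 then (trip + 1, coup) else if s1.2.2 = 2 then (trip, coup + 1) else (trip, coup)
    pvLoopA1 (r.2.2.drop 1) s1.1 s2.2 s2.1 s1.2.1
  termination_by l _ _ _ _ => l.length
  decreasing_by
    simp only [List.length_drop]
    have := pvRunOnes_len (x :: xs)
    simp only [List.length_cons] at *
    omega

-- inner while of A's second loop: (spaces, remaining suffix at k)
def pvSkipZeros : List Int → Nat × List Int
  | [] => (0, [])
  | x :: xs =>
    if x = 0 then
      let p := pvSkipZeros xs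
      (p.1 + 1, p.2)
    else (0, x :: xs)

theorem pvSkipZeros_len (l : List Int) : (pvSkipZeros l).2.length ≤ l.length := by
  induction l with
  | nil => simp [pvSkipZeros]
  | cons x xs ih => by_cases h : x = 0 <;> simp [pvSkipZeros, h] <;> omega

-- A's second while loop; 'j < len - 1' holds iff the suffix at j has ≥ 2 elements
def pvLoopA2 : List Int → Int → Int → Int → Int × Int × Int
  | x :: y :: rest, big, trig, quad =>
    if x = 1 then
      let p := pvSkipZeros (y :: rest)
      -- if k < len and PAC[k] == 1: classify spaces
      let s : Int × Int × Int :=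
        if p.2.head? = some 1 then
          if p.1 = 1 then (big + 1, trig, quad)
          else if p.1 = 2 then (big, trig + 1, quad)
          else if p.1 = 3 then (big, trig, quad + 1)
          else (big, trig, quad)
        else (big, trig, quad)
      pvLoopA2 p.2 s.1 s.2.1 s.2.2
    else pvLoopA2 (y :: rest) big trig quad
  | _, big, trig, quad => (big, trig, quad)
  termination_by l _ _ _ => l.length
  decreasing_by
    · have := pvSkipZeros_len (y :: rest)
      simp only [List.length_cons] at *
      omega
    · simp

def PACcounter (PAC_R_Peaks : List Int) (hr_counts : Int) : List (String × Int) :=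
  let r1 := pvLoopA1 PAC_R_Peaks 0 0 0 0
  let svt := r1.1
  let coup := r1.2.1
  let trip := r1.2.2.1
  let at_ := r1.2.2.2
  let r2 := pvLoopA2 PAC_R_Peaks 0 0 0
  let big := r2.1
  let trig := r2.2.1
  let quad := r2.2.2
  let total_one := 1 * at_ + coup * 2 + trip * 3 + big * 2 + trig * 2 + quad * 2
  let total := svt + coup + trip + big + trig + quad
  let ones : Int := (PySem.List.count PAC_R_Peaks 1 : Int)
  let isolated := if total = 0 then ones else ones - (total_one - (total - 1))
  let z : Int × Int × Int × Int × Int × Int :=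
    if hr_counts > 100 ∧ svt ≠ 0 then (0, 0, 0, 0, 0, 0) else (trip, coup, quad, trig, big, isolated)
  let svt' : Int := if svt ≥ 1 ∧ hr_counts > 100 then 1 else 0
  [("PAC-Isolated_counter", z.2.2.2.2.2), ("PAC-Bigem_counter", z.2.2.2.2.1),
   ("PAC-Trigem_counter", z.2.2.2.1), ("PAC-Quadrigem_counter", z.2.2.1),
   ("PAC-Couplet_counter", z.2.1), ("PAC-Triplet_counter", z.1), ("SVT_counter", svt')]

-- ===== PORT B =====
-- the state carried through B's single pass (the tuple 'st' in Source B)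
structure PVSt where
  svt : Int
  coup : Int
  trip : Int
  big : Int
  trig : Int
  quad : Int
  atC : Int
  ones : Int
  lastOne : Bool
  gap : Nat
deriving Repr, DecidableEq

def pvInit : PVSt := ⟨0, 0, 0, 0, 0, 0, 0, 0, false, 0⟩

-- Source B's 'finish(st, v, c)': absorb one finished run of value v, length c
def pvFinish (st : PVSt) (v : Int) (c : Nat) : PVSt :=
  if v = 1 then
    let st1 := { st with ones := st.ones + (c : Int) }
    let st2 :=
      if c ≥ 4 then { st1 with svt := st1.svt + 1, atC := st1.atC + (c : Int) }
      else if c = 3 then { st1 with trip := st1.trip + 1 }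
      else if c = 2 then { st1 with coup := st1.coup + 1 }
      else st1
    let st3 :=
      if st.gap = 1 then { st2 with big := st2.big + 1 }
      else if st.gap = 2 then { st2 with trig := st2.trig + 1 }
      else if st.gap = 3 then { st2 with quad := st2.quad + 1 }
      else st2
    { st3 with lastOne := true, gap := 0 }
  else if v = 0 then { st with lastOne := false, gap := if st.lastOne then c else 0 }
  else { st with lastOne := false, gap := 0 }

-- Source B's loop body: state = (st, cur_val, cur_len)
def pvStep (acc : PVSt × Int × Nat) (x : Int) : PVSt × Int × Nat :=
  if acc.2.2 ≠ 0 ∧ x = acc.2.1 then (acc.1, acc.2.1, acc.2.2 + 1)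
  else if acc.2.2 ≠ 0 then (pvFinish acc.1 acc.2.1 acc.2.2, x, 1)
  else (acc.1, x, 1)

def PACcounter_alt (PAC_R_Peaks : List Int) (hr_counts : Int) : List (String × Int) :=
  let r := PAC_R_Peaks.foldl pvStep (pvInit, 0, 0)
  let s := if r.2.2 ≠ 0 then pvFinish r.1 r.2.1 r.2.2 else r.1
  let total := s.svt + s.coup + s.trip + s.big + s.trig + s.quad
  let extra := s.atC + 2 * (s.coup + s.big + s.trig + s.quad) + 3 * s.trip
  let isolated := if total = 0 then s.ones else s.ones - extra + total - 1
  [("PAC-Isolated_counter", if s.svt ≠ 0 ∧ hr_counts > 100 then 0 else isolated),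
   ("PAC-Bigem_counter", if s.svt ≠ 0 ∧ hr_counts > 100 then 0 else s.big),
   ("PAC-Trigem_counter", if s.svt ≠ 0 ∧ hr_counts > 100 then 0 else s.trig),
   ("PAC-Quadrigem_counter", if s.svt ≠ 0 ∧ hr_counts > 100 then 0 else s.quad),
   ("PAC-Couplet_counter", if s.svt ≠ 0 ∧ hr_counts > 100 then 0 else s.coup),
   ("PAC-Triplet_counter", if s.svt ≠ 0 ∧ hr_counts > 100 then 0 else s.trip),
   ("SVT_counter", if s.svt ≠ 0 ∧ hr_counts > 100 then 1 else 0)]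

-- ===== PRECONDITION & SPEC =====
def Spec_PACcounter (PAC_R_Peaks : List Int) (hr_counts : Int) (out : List (String × Int)) : Prop := out = PACcounter_alt PAC_R_Peaks hr_counts
instance (PAC_R_Peaks : List Int) (hr_counts : Int) (out : List (String × Int)) : Decidable (Spec_PACcounter PAC_R_Peaks hr_counts out) := by unfold Spec_PACcounter; infer_instance

-- ===== CLAIM (what is proved, stated in full; the proofs are below) =====
def Claim_equal_PACcounter : Prop := ∀ (PAC_R_Peaks : List Int) (hr_counts : Int), Dom_PACcounter PAC_R_Peaks hr_counts → Spec_PACcounter PAC_R_Peaks hr_counts (PACcounter PAC_R_Peaks hr_counts)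

-- ===== LEMMAS AND PROOFS =====

-- proof-only intermediate: run-length encoding and segment-level recursions
def pvTakeRun (v : Int) : List Int → Nat × List Int
  | [] => (0, [])
  | y :: ys =>
    if y = v then
      let p := pvTakeRun v ys
      (p.1 + 1, p.2)
    else (0, y :: ys)

theorem pvTakeRun_len (v : Int) (l : List Int) : (pvTakeRun v l).2.length ≤ l.length := by
  induction l with
  | nil => simp [pvTakeRun]
  | cons x xs ih => by_cases h : x = v <;> simp [pvTakeRun, h] <;> omega

def pvRle : List Int → List (Int × Nat)
  | [] => []
  | x :: xs =>
    let p := pvTakeRun x xs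
    (x, p.1 + 1) :: pvRle p.2
  termination_by l => l.length
  decreasing_by
    have := pvTakeRun_len x xs
    simp only [List.length_cons]
    omega

-- segment-level view of A's first loop
def pvPass1 : List (Int × Nat) → Int → Int → Int → Int → Int × Int × Int × Int
  | [], svt, coup, trip, at_ => (svt, coup, trip, at_)
  | (v, c) :: t, svt, coup, trip, at_ =>
    if v = 1 then
      if c ≥ 4 then pvPass1 t (svt + 1) coup trip (at_ + (c : Int))
      else if c = 3 then pvPass1 t svt coup (trip + 1) at_
      else if c = 2 then pvPass1 t svt (coup + 1) trip at_
      else pvPass1 t svt coup trip at_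
    else pvPass1 t svt coup trip at_

-- segment-level view of A's second loop (windowed)
def pvPass2 : List (Int × Nat) → Int → Int → Int → Int × Int × Int
  | (pv, pc) :: (gv, gc) :: (nv, nc) :: t, big, trig, quad =>
    let s : Int × Int × Int :=
      if pv = 1 ∧ gv = 0 ∧ nv = 1 then
        if gc = 1 then (big + 1, trig, quad)
        else if gc = 2 then (big, trig + 1, quad)
        else if gc = 3 then (big, trig, quad + 1)
        else (big, trig, quad)
      else (big, trig, quad)
    pvPass2 ((gv, gc) :: (nv, nc) :: t) s.1 s.2.1 s.2.2
  | _, big, trig, quad => (big, trig, quad)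

-- segment-level view of B's gap bookkeeping (streaming)
def pvGapRec : List (Int × Nat) → Bool → Nat → Int → Int → Int → Int × Int × Int
  | [], _, _, b, t, q => (b, t, q)
  | (v, c) :: tl, lastOne, gap, b, t, q =>
    if v = 1 then
      let s : Int × Int × Int :=
        if gap = 1 then (b + 1, t, q)
        else if gap = 2 then (b, t + 1, q)
        else if gap = 3 then (b, t, q + 1)
        else (b, t, q)
      pvGapRec tl true 0 s.1 s.2.1 s.2.2
    else if v = 0 then pvGapRec tl false (if lastOne then c else 0) b t q
    else pvGapRec tl false 0 b t q

def pvOnesSum : List (Int × Nat) → Nat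
  | [] => 0
  | (v, c) :: tl => (if v = 1 then c else 0) + pvOnesSum tl

def pvRunSegs (segs : List (Int × Nat)) (s : PVSt) : PVSt :=
  segs.foldl (fun s p => pvFinish s p.1 p.2) s

def pvFlush (r : PVSt × Int × Nat) : PVSt :=
  if r.2.2 ≠ 0 then pvFinish r.1 r.2.1 r.2.2 else r.1

-- ===== A-side reductions to the segment view =====
theorem runOnes_eq_takeRun (l : List Int) :
    pvRunOnes l = ((pvTakeRun 1 l).1, (pvTakeRun 1 l).1, (pvTakeRun 1 l).2) := by
  induction l with
  | nil => simp [pvRunOnes, pvTakeRun]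
  | cons x xs ih => by_cases h : x = 1 <;> simp [pvRunOnes, pvTakeRun, h, ih]

theorem skipZeros_eq_takeRun (l : List Int) : pvSkipZeros l = pvTakeRun 0 l := by
  induction l with
  | nil => simp [pvSkipZeros, pvTakeRun]
  | cons x xs ih => by_cases h : x = 0 <;> simp [pvSkipZeros, pvTakeRun, h, ih]

theorem takeRun_head (v : Int) (l : List Int) : (pvTakeRun v l).2.head? ≠ some v := by
  induction l with
  | nil => simp [pvTakeRun]
  | cons x xs ih => by_cases h : x = v <;> simp [pvTakeRun, h, ih]

theorem takeRun_decomp (v : Int) (l : List Int) :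
    l = List.replicate (pvTakeRun v l).1 v ++ (pvTakeRun v l).2 := by
  induction l with
  | nil => simp [pvTakeRun]
  | cons x xs ih =>
    by_cases h : x = v
    · subst h; simp [pvTakeRun, List.replicate_succ]; exact ih
    · simp [pvTakeRun, h]

theorem rle_cons (x : Int) (xs : List Int) :
    pvRle (x :: xs) = (x, (pvTakeRun x xs).1 + 1) :: pvRle (pvTakeRun x xs).2 := by
  rw [pvRle]

theorem pass1_rle_cons_ne1 (x : Int) (hx : x ≠ 1) (xs : List Int) (svt coup trip at_ : Int) :
    pvPass1 (pvRle (x :: xs)) svt coup trip at_ = pvPass1 (pvRle xs) svt coup trip at_ := by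
  cases xs with
  | nil => simp [rle_cons, pvTakeRun, pvRle, pvPass1, hx]
  | cons y ys =>
    by_cases hy : y = x
    · rw [hy, rle_cons, rle_cons]
      rw [show pvTakeRun x (x :: ys) = ((pvTakeRun x ys).1 + 1, (pvTakeRun x ys).2) from by
        simp [pvTakeRun]]
      simp [pvPass1, hx]
    · rw [rle_cons (x := x)]
      rw [show pvTakeRun x (y :: ys) = (0, y :: ys) from by simp [pvTakeRun, hy]]
      simp [pvPass1, hx]

theorem pass1_drop1 (rest : List Int) (h : rest.head? ≠ some 1) (svt coup trip at_ : Int) :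
    pvPass1 (pvRle rest) svt coup trip at_ = pvPass1 (pvRle (rest.drop 1)) svt coup trip at_ := by
  cases rest with
  | nil => simp
  | cons r rs =>
    have hr : r ≠ 1 := by simpa using h
    simpa using (pass1_rle_cons_ne1 r hr rs svt coup trip at_)

theorem pass2_cons_ne1 (v : Int) (hv : v ≠ 1) (n : Nat) (segs : List (Int × Nat)) (b t q : Int) :
    pvPass2 ((v, n) :: segs) b t q = pvPass2 segs b t q := by
  match segs with
  | [] => simp [pvPass2]
  | [a] => obtain ⟨a1, a2⟩ := a; simp [pvPass2]
  | (gv, gc) :: (nv, nc) :: t' => simp [pvPass2, hv]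

theorem pass2_head_irrel (v : Int) (n m : Nat) (segs : List (Int × Nat)) (b t q : Int) :
    pvPass2 ((v, n) :: segs) b t q = pvPass2 ((v, m) :: segs) b t q := by
  match segs with
  | [] => simp [pvPass2]
  | [a] => obtain ⟨a1, a2⟩ := a; simp [pvPass2]
  | (gv, gc) :: (nv, nc) :: t' => simp [pvPass2]

theorem pass2_cons_gv_ne0 (pv gv : Int) (hgv : gv ≠ 0) (pc gc : Nat) (T : List (Int × Nat)) (b t q : Int) :
    pvPass2 ((pv, pc) :: (gv, gc) :: T) b t q = pvPass2 ((gv, gc) :: T) b t q := by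
  match T with
  | [] => simp [pvPass2]
  | (nv, nc) :: t' => simp [pvPass2, hgv]

theorem pass2_cons_nv_ne1 (pv gv nv : Int) (hnv : nv ≠ 1) (pc gc nc : Nat) (T : List (Int × Nat)) (b t q : Int) :
    pvPass2 ((pv, pc) :: (gv, gc) :: (nv, nc) :: T) b t q = pvPass2 ((gv, gc) :: (nv, nc) :: T) b t q := by
  simp [pvPass2, hnv]

theorem pass2_rle_cons_ne1 (x : Int) (hx : x ≠ 1) (xs : List Int) (b t q : Int) :
    pvPass2 (pvRle (x :: xs)) b t q = pvPass2 (pvRle xs) b t q := by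
  cases xs with
  | nil => simp [rle_cons, pvTakeRun, pvRle, pvPass2]
  | cons y ys =>
    by_cases hy : y = x
    · rw [hy, rle_cons, rle_cons]
      rw [show pvTakeRun x (x :: ys) = ((pvTakeRun x ys).1 + 1, (pvTakeRun x ys).2) from by
        simp [pvTakeRun]]
      exact pass2_head_irrel _ _ _ _ _ _ _
    · rw [rle_cons (x := x)]
      rw [show pvTakeRun x (y :: ys) = (0, y :: ys) from by simp [pvTakeRun, hy]]
      exact pass2_cons_ne1 x hx _ _ _ _ _

theorem loopA1_eq_aux (n : Nat) : ∀ (l : List Int), l.length ≤ n → ∀ (svt coup trip at_ : Int),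
    pvLoopA1 l svt coup trip at_ = pvPass1 (pvRle l) svt coup trip at_ := by
  induction n with
  | zero =>
    intro l hl svt coup trip at_
    have : l = [] := List.eq_nil_of_length_eq_zero (Nat.le_zero.mp hl)
    subst this
    simp [pvLoopA1, pvRle, pvPass1]
  | succ n ih =>
    intro l hl svt coup trip at_
    match l with
    | [] => simp [pvLoopA1, pvRle, pvPass1]
    | x :: xs =>
      have hlen : xs.length ≤ n := by simpa using hl
      by_cases hx : x = 1
      · subst hx
        have hrl : ((pvTakeRun 1 xs).2.drop 1).length ≤ n := by
          have h1 := pvTakeRun_len 1 xs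
          simp only [List.length_drop]
          omega
        have key : ∀ (svt' coup' trip' at' : Int),
            pvPass1 (pvRle (pvTakeRun 1 xs).2) svt' coup' trip' at' =
            pvLoopA1 ((pvTakeRun 1 xs).2.drop 1) svt' coup' trip' at' := by
          intro svt' coup' trip' at'
          rw [pass1_drop1 _ (takeRun_head 1 xs), ih _ hrl]
        simp only [pvLoopA1, runOnes_eq_takeRun, rle_cons]
        rw [show pvTakeRun 1 ((1:Int) :: xs) = ((pvTakeRun 1 xs).1 + 1, (pvTakeRun 1 xs).2) from by
          simp [pvTakeRun]]
        simp only [pvPass1]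
        simp only [key]
        try dsimp only
        split_ifs <;> first | rfl | omega | simp_all
      · simp only [pvLoopA1, runOnes_eq_takeRun]
        rw [show pvTakeRun 1 (x :: xs) = (0, x :: xs) from by simp [pvTakeRun, hx]]
        norm_num
        rw [pass1_rle_cons_ne1 x hx xs, ← ih _ hlen]

theorem loopA2_eq_aux (n : Nat) : ∀ (l : List Int), l.length ≤ n → ∀ (b t q : Int),
    pvLoopA2 l b t q = pvPass2 (pvRle l) b t q := by
  induction n with
  | zero =>
    intro l hl b t q
    have : l = [] := List.eq_nil_of_length_eq_zero (Nat.le_zero.mp hl)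
    subst this
    simp [pvLoopA2, pvRle, pvPass2]
  | succ n ih =>
    intro l hl b t q
    match l with
    | [] => simp [pvLoopA2, pvRle, pvPass2]
    | [x] => simp [pvLoopA2, rle_cons, pvTakeRun, pvRle, pvPass2]
    | x :: y :: rest =>
      have hlen : (y :: rest).length ≤ n := by simpa using hl
      by_cases hx : x = 1
      · subst hx
        by_cases hy : y = 1
        · subst hy
          simp only [pvLoopA2]
          rw [show pvSkipZeros ((1:Int) :: rest) = (0, (1:Int) :: rest) from by
            simp [pvSkipZeros]]
          norm_num
          rw [ih _ hlen]
          rw [rle_cons, rle_cons]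
          rw [show pvTakeRun 1 ((1:Int) :: rest) = ((pvTakeRun 1 rest).1 + 1, (pvTakeRun 1 rest).2) from by
            simp [pvTakeRun]]
          exact pass2_head_irrel _ _ _ _ _ _ _
        · by_cases hy0 : y = 0
          · subst hy0
            rcases htr : pvTakeRun 0 rest with ⟨z, r2⟩
            have hr2l : r2.length ≤ n := by
              have h1 : r2.length ≤ rest.length := by
                have h := pvTakeRun_len 0 rest
                rw [htr] at h
                exact h
              simp only [List.length_cons] at hl
              omega
            have hr2h : r2.head? ≠ some 0 := by
              have := takeRun_head 0 rest
              rwa [htr] at this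
            have hshape : pvRle ((1:Int) :: 0 :: rest) = ((1:Int), 1) :: ((0:Int), z + 1) :: pvRle r2 := by
              rw [rle_cons]
              rw [show pvTakeRun 1 ((0:Int) :: rest) = (0, (0:Int) :: rest) from by
                simp [pvTakeRun]]
              rw [rle_cons]
              rw [htr]
            simp only [pvLoopA2, if_true]
            rw [show pvSkipZeros ((0:Int) :: rest) = (z + 1, r2) from by
              simp [pvSkipZeros, skipZeros_eq_takeRun, htr]]
            try dsimp only
            rw [hshape]
            match hm : r2 with
            | [] =>
              simp [pvLoopA2, pvRle, pvPass2]
            | w :: rs =>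
              have hw0 : w ≠ 0 := by simpa using hr2h
              have hwl : (w :: rs).length ≤ n := hr2l
              by_cases hw : w = 1
              · subst hw
                simp only [List.head?_cons]
                rw [ih _ hwl]
                rw [rle_cons (x := (1:Int))]
                simp only [pvPass2]
                rw [pass2_cons_ne1 (0:Int) (by norm_num)]
                try dsimp only
                split_ifs <;> first | rfl | omega | simp_all
              · simp only [List.head?_cons]
                rw [if_neg (by simpa using hw)]
                rw [ih _ hwl]
                rw [rle_cons (x := w)]
                rw [pass2_cons_nv_ne1 1 0 w hw]
                rw [pass2_cons_ne1 (0:Int) (by norm_num)]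
          · -- x = 1, y not in {0, 1}
            simp only [pvLoopA2, if_true]
            rw [show pvSkipZeros (y :: rest) = (0, y :: rest) from by simp [pvSkipZeros, hy0]]
            simp only [List.head?_cons]
            try dsimp only
            rw [if_neg (by simpa using hy)]
            rw [ih _ hlen]
            rw [rle_cons (x := (1:Int))]
            rw [show pvTakeRun 1 (y :: rest) = (0, y :: rest) from by simp [pvTakeRun, hy]]
            rw [rle_cons (x := y)]
            exact (pass2_cons_gv_ne0 1 y hy0 _ _ _ _ _ _).symm
      · simp only [pvLoopA2]
        rw [if_neg hx]
        rw [ih _ hlen]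
        exact (pass2_rle_cons_ne1 x hx (y :: rest) b t q).symm

theorem loopA1_eq (l : List Int) (svt coup trip at_ : Int) :
    pvLoopA1 l svt coup trip at_ = pvPass1 (pvRle l) svt coup trip at_ :=
  loopA1_eq_aux l.length l (le_refl _) svt coup trip at_

theorem loopA2_eq (l : List Int) (b t q : Int) :
    pvLoopA2 l b t q = pvPass2 (pvRle l) b t q :=
  loopA2_eq_aux l.length l (le_refl _) b t q

-- ===== B-side: the fold equals the segment machine on the RLE =====
theorem fold_run_aux (l : List Int) : ∀ (s : PVSt) (v : Int) (c : Nat),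
    pvFlush (l.foldl pvStep (s, v, c + 1)) =
      pvRunSegs ((v, c + 1 + (pvTakeRun v l).1) :: pvRle (pvTakeRun v l).2) s := by
  induction l with
  | nil =>
    intro s v c
    simp [pvFlush, pvTakeRun, pvRle, pvRunSegs]
  | cons x xs ih =>
    intro s v c
    by_cases hx : x = v
    · subst hx
      rw [List.foldl_cons,
        show pvStep (s, x, c + 1) x = (s, x, c + 1 + 1) from by simp [pvStep],
        ih s x (c + 1),
        show pvTakeRun x (x :: xs) = ((pvTakeRun x xs).1 + 1, (pvTakeRun x xs).2) from by
          simp [pvTakeRun]]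
      have h : c + 1 + 1 + (pvTakeRun x xs).1 = c + 1 + ((pvTakeRun x xs).1 + 1) := by omega
      rw [h]
    · rw [List.foldl_cons,
        show pvStep (s, v, c + 1) x = (pvFinish s v (c + 1), x, 0 + 1) from by
          simp [pvStep, hx],
        ih (pvFinish s v (c + 1)) x 0,
        show pvTakeRun v (x :: xs) = (0, x :: xs) from by simp [pvTakeRun, hx],
        rle_cons]
      rw [show (0:Nat) + 1 + (pvTakeRun x xs).1 = (pvTakeRun x xs).1 + 1 from by omega]
      rfl

theorem fold_eq_runSegs (l : List Int) :
    pvFlush (l.foldl pvStep (pvInit, 0, 0)) = pvRunSegs (pvRle l) pvInit := by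
  cases l with
  | nil => simp [pvFlush, pvRle, pvRunSegs]
  | cons x xs =>
    rw [List.foldl_cons,
      show pvStep (pvInit, 0, 0) x = (pvInit, x, 0 + 1) from by simp [pvStep],
      fold_run_aux xs pvInit x 0, rle_cons]
    rw [show (0:Nat) + 1 + (pvTakeRun x xs).1 = (pvTakeRun x xs).1 + 1 from by omega]

-- ===== machine projections =====
theorem runSegs_cons (v : Int) (c : Nat) (tl : List (Int × Nat)) (s : PVSt) :
    pvRunSegs ((v, c) :: tl) s = pvRunSegs tl (pvFinish s v c) := rfl

theorem runSegs_pass1 (segs : List (Int × Nat)) : ∀ (s : PVSt),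
    ((pvRunSegs segs s).svt, (pvRunSegs segs s).coup, (pvRunSegs segs s).trip, (pvRunSegs segs s).atC)
      = pvPass1 segs s.svt s.coup s.trip s.atC := by
  induction segs with
  | nil => intro s; simp [pvRunSegs, pvPass1]
  | cons hd tl ih =>
    intro s
    obtain ⟨v, c⟩ := hd
    rw [runSegs_cons, ih]
    by_cases hv : v = 1
    · simp only [pvFinish, pvPass1, hv, if_true]
      split_ifs <;> simp_all
    · by_cases hv0 : v = 0 <;> simp [pvFinish, pvPass1, hv, hv0]

theorem runSegs_gap (segs : List (Int × Nat)) : ∀ (s : PVSt),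
    ((pvRunSegs segs s).big, (pvRunSegs segs s).trig, (pvRunSegs segs s).quad)
      = pvGapRec segs s.lastOne s.gap s.big s.trig s.quad := by
  induction segs with
  | nil => intro s; simp [pvRunSegs, pvGapRec]
  | cons hd tl ih =>
    intro s
    obtain ⟨v, c⟩ := hd
    rw [runSegs_cons, ih]
    by_cases hv : v = 1
    · simp only [pvFinish, pvGapRec, hv, if_true]
      split_ifs <;> simp_all
    · by_cases hv0 : v = 0 <;> simp [pvFinish, pvGapRec, hv, hv0]

theorem runSegs_ones (segs : List (Int × Nat)) : ∀ (s : PVSt),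
    (pvRunSegs segs s).ones = s.ones + (pvOnesSum segs : Int) := by
  induction segs with
  | nil => intro s; simp [pvRunSegs, pvOnesSum]
  | cons hd tl ih =>
    intro s
    obtain ⟨v, c⟩ := hd
    rw [runSegs_cons, ih]
    by_cases hv : v = 1
    · simp only [pvFinish, pvOnesSum, hv, if_true]
      split_ifs <;> simp_all <;> push_cast <;> ring
    · by_cases hv0 : v = 0 <;> simp [pvFinish, pvOnesSum, hv, hv0]

-- ===== streaming gap recursion equals windowed pass2 =====
theorem gapRec_eq_pass2_aux (n : Nat) : ∀ (segs : List (Int × Nat)), segs.length ≤ n →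
    ∀ (b t q : Int),
      (pvGapRec segs false 0 b t q = pvPass2 segs b t q) ∧
      (∀ pc : Nat, pvGapRec segs true 0 b t q = pvPass2 ((1, pc) :: segs) b t q) := by
  induction n with
  | zero =>
    intro segs hl b t q
    have : segs = [] := List.eq_nil_of_length_eq_zero (Nat.le_zero.mp hl)
    subst this
    exact ⟨by simp [pvGapRec, pvPass2], fun pc => by simp [pvGapRec, pvPass2]⟩
  | succ n ih =>
    intro segs hl b t q
    match segs with
    | [] => exact ⟨by simp [pvGapRec, pvPass2], fun pc => by simp [pvGapRec, pvPass2]⟩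
    | (v, c) :: tl =>
      have htl : tl.length ≤ n := by simp only [List.length_cons] at hl; omega
      constructor
      · by_cases hv : v = 1
        · subst hv
          rw [show pvGapRec ((1, c) :: tl) false 0 b t q = pvGapRec tl true 0 b t q from by
            simp [pvGapRec]]
          exact (ih tl htl b t q).2 c
        · rw [show pvGapRec ((v, c) :: tl) false 0 b t q = pvGapRec tl false 0 b t q from by
            by_cases hv0 : v = 0 <;> simp [pvGapRec, hv, hv0]]
          rw [(ih tl htl b t q).1, pass2_cons_ne1 v hv]
      · intro pc
        by_cases hv : v = 1
        · subst hv
          rw [show pvGapRec ((1, c) :: tl) true 0 b t q = pvGapRec tl true 0 b t q from by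
            simp [pvGapRec]]
          rw [(ih tl htl b t q).2 c]
          match tl with
          | [] => simp [pvPass2]
          | (nv, nc) :: t2 =>
            conv_rhs => rw [show pvPass2 ((1, pc) :: (1, c) :: (nv, nc) :: t2) b t q =
              pvPass2 ((1, c) :: (nv, nc) :: t2) b t q from by simp [pvPass2]]
        · by_cases hv0 : v = 0
          · subst hv0
            rw [show pvGapRec (((0:Int), c) :: tl) true 0 b t q = pvGapRec tl false c b t q from by
              simp [pvGapRec]]
            match tl with
            | [] => simp [pvGapRec, pvPass2]
            | (nv, nc) :: t2 =>
              have ht2 : t2.length ≤ n := by simp only [List.length_cons] at hl; omega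
              by_cases hnv : nv = 1
              · subst hnv
                -- both sides classify the pending gap c, then continue after the 1-run
                rw [show pvGapRec (((1:Int), nc) :: t2) false c b t q =
                    pvGapRec t2 true 0
                      (if c = 1 then (b+1,t,q) else if c = 2 then (b,t+1,q) else if c = 3 then (b,t,q+1) else (b,t,q)).1
                      (if c = 1 then (b+1,t,q) else if c = 2 then (b,t+1,q) else if c = 3 then (b,t,q+1) else (b,t,q)).2.1
                      (if c = 1 then (b+1,t,q) else if c = 2 then (b,t+1,q) else if c = 3 then (b,t,q+1) else (b,t,q)).2.2 from by
                  simp [pvGapRec]]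
                rw [show pvPass2 ((1, pc) :: ((0:Int), c) :: ((1:Int), nc) :: t2) b t q =
                    pvPass2 (((0:Int), c) :: ((1:Int), nc) :: t2)
                      (if c = 1 then (b+1,t,q) else if c = 2 then (b,t+1,q) else if c = 3 then (b,t,q+1) else (b,t,q)).1
                      (if c = 1 then (b+1,t,q) else if c = 2 then (b,t+1,q) else if c = 3 then (b,t,q+1) else (b,t,q)).2.1
                      (if c = 1 then (b+1,t,q) else if c = 2 then (b,t+1,q) else if c = 3 then (b,t,q+1) else (b,t,q)).2.2 from by
                  simp [pvPass2]]
                rw [pass2_cons_ne1 (0:Int) (by norm_num)]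
                exact (ih t2 ht2 _ _ _).2 nc
              · rw [show pvGapRec ((nv, nc) :: t2) false c b t q = pvGapRec t2 false 0 b t q from by
                  by_cases hnv0 : nv = 0 <;> simp [pvGapRec, hnv, hnv0]]
                rw [(ih t2 ht2 b t q).1]
                rw [show pvPass2 ((1, pc) :: ((0:Int), c) :: (nv, nc) :: t2) b t q =
                    pvPass2 (((0:Int), c) :: (nv, nc) :: t2) b t q from by simp [pvPass2, hnv]]
                rw [pass2_cons_ne1 (0:Int) (by norm_num), pass2_cons_ne1 nv hnv]
          · rw [show pvGapRec ((v, c) :: tl) true 0 b t q = pvGapRec tl false 0 b t q from by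
              simp [pvGapRec, hv, hv0]]
            rw [(ih tl htl b t q).1]
            match tl with
            | [] => simp [pvPass2]
            | (nv, nc) :: t2 =>
              rw [show pvPass2 ((1, pc) :: (v, c) :: (nv, nc) :: t2) b t q =
                  pvPass2 ((v, c) :: (nv, nc) :: t2) b t q from by simp [pvPass2, hv0]]
              rw [pass2_cons_ne1 v hv]

theorem gapRec_eq_pass2 (segs : List (Int × Nat)) (b t q : Int) :
    pvGapRec segs false 0 b t q = pvPass2 segs b t q :=
  (gapRec_eq_pass2_aux segs.length segs (le_refl _) b t q).1

-- ===== count of ones =====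
theorem onesSum_rle_aux (n : Nat) : ∀ (l : List Int), l.length ≤ n →
    pvOnesSum (pvRle l) = l.count 1 := by
  induction n with
  | zero =>
    intro l hl
    have : l = [] := List.eq_nil_of_length_eq_zero (Nat.le_zero.mp hl)
    subst this
    simp [pvRle, pvOnesSum]
  | succ n ih =>
    intro l hl
    match l with
    | [] => simp [pvRle, pvOnesSum]
    | x :: xs =>
      rcases htr : pvTakeRun x xs with ⟨k, rest⟩
      have hrl : rest.length ≤ n := by
        have h2 : rest.length ≤ xs.length := by
          have := pvTakeRun_len x xs
          rw [htr] at this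
          exact this
        simp only [List.length_cons] at hl
        omega
      have hdec := takeRun_decomp x xs
      rw [htr] at hdec
      rw [rle_cons, htr]
      simp only [pvOnesSum, ih rest hrl]
      rw [show (x :: xs).count 1 = xs.count 1 + (if x = 1 then 1 else 0) from by
        by_cases h : x = 1 <;> simp [h, List.count_cons]]
      conv_rhs => rw [hdec]
      rw [List.count_append, List.count_replicate]
      by_cases h : x = 1 <;> simp [h] <;> omega

theorem onesSum_rle (l : List Int) : pvOnesSum (pvRle l) = PySem.List.count l 1 := by
  rw [PySem.List.count_eq]
  exact onesSum_rle_aux l.length l (le_refl _)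

-- ===== svt is nonnegative =====
theorem pass1_svt_le (segs : List (Int × Nat)) : ∀ (svt coup trip at_ : Int),
    svt ≤ (pvPass1 segs svt coup trip at_).1 := by
  induction segs with
  | nil => intro svt coup trip at_; simp [pvPass1]
  | cons hd tl ih =>
    intro svt coup trip at_
    obtain ⟨v, c⟩ := hd
    simp only [pvPass1]
    split_ifs <;> first | exact ih .. | exact le_trans (by omega) (ih ..)

-- ===== VERDICT (by name: the statement is the Claim_ definition above) =====
theorem PACcounter_spec : Claim_equal_PACcounter := by
  intro l hr _
  simp only [Spec_PACcounter, PACcounter, PACcounter_alt]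
  rw [loopA1_eq, loopA2_eq]
  have hB : (if (l.foldl pvStep (pvInit, 0, 0)).2.2 ≠ 0 then
      pvFinish (l.foldl pvStep (pvInit, 0, 0)).1 (l.foldl pvStep (pvInit, 0, 0)).2.1
        (l.foldl pvStep (pvInit, 0, 0)).2.2
    else (l.foldl pvStep (pvInit, 0, 0)).1) = pvRunSegs (pvRle l) pvInit := fold_eq_runSegs l
  rw [hB]
  have h1 : ((pvRunSegs (pvRle l) pvInit).svt, (pvRunSegs (pvRle l) pvInit).coup,
      (pvRunSegs (pvRle l) pvInit).trip, (pvRunSegs (pvRle l) pvInit).atC)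
      = pvPass1 (pvRle l) 0 0 0 0 := runSegs_pass1 (pvRle l) pvInit
  have h2 : ((pvRunSegs (pvRle l) pvInit).big, (pvRunSegs (pvRle l) pvInit).trig,
      (pvRunSegs (pvRle l) pvInit).quad) = pvGapRec (pvRle l) false 0 0 0 0 :=
    runSegs_gap (pvRle l) pvInit
  have h3 : (pvRunSegs (pvRle l) pvInit).ones = 0 + (pvOnesSum (pvRle l) : Int) :=
    runSegs_ones (pvRle l) pvInit
  rw [gapRec_eq_pass2] at h2
  rw [onesSum_rle] at h3
  have hsvt0 : 0 ≤ (pvRunSegs (pvRle l) pvInit).svt := by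
    have h := pass1_svt_le (pvRle l) 0 0 0 0
    have hc : (pvPass1 (pvRle l) 0 0 0 0).1 = (pvRunSegs (pvRle l) pvInit).svt := by
      rw [← h1]
    omega
  rw [← h1, ← h2, h3]
  simp only [List.cons.injEq, Prod.mk.injEq, and_true, true_and]
  and_intros <;> split_ifs <;> simp_all <;> omega
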